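-- pv_equiv track=rewrite | github.com/alexandraback/datacollection | solutions_5765824346324992_0/Python/VSH/B.py | process
-- ===== SOURCE A (Python) =====
-- def process(b, n, ms):
--     idle = [0 for i in range(b)]
--     nxt = 1
--     poss = []
--     while nxt == 1 or idle != [0 for i in range(b)]:
--         if 0 in idle:
--             for i in range(b):
--                 if idle[i] == 0:
--                     if nxt == n:
--                         return i + 1
--                     nxt += 1
--                     idle[i] = ms[i]
--                     poss.append(i + 1)
--                     break
--         else:
--             m = min(idle)
--             for i in range(b):
--                 idle[i] -= m
--     j = nxt - 1
--     return poss[n % j - 1]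
-- ===== SOURCE B (Python) =====
-- def process(b, n, ms):
--     # with b barbers all free at time 0, customer n (1-based) walks straight to barber n
--     if 1 <= n <= b:
--         return n
--     # Barber i starts haircuts exactly at the times t = 0, ms[i], 2*ms[i], ...
--     # count(t) = how many customers can have STARTED by time t (inclusive).
--     def count(t):
--         return sum(t // ms[i] + 1 for i in range(b))
--     if count(0) >= n:
--         t = 0
--     else:
--         # customer n has certainly started by time max(ms[:b]) * n
--         lo, hi = 0, max(ms[:b]) * n
--         # invariant: count(lo) < n <= count(hi)
--         while hi - lo > 1:
--             mid = (lo + hi) // 2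
--             if count(mid) >= n:
--                 hi = mid
--             else:
--                 lo = mid
--         t = hi
--     # customer n is the k-th customer to start exactly at time t,
--     # served by the k-th barber (in index order) free at time t
--     k = n - (count(t - 1) if t > 0 else 0)
--     for i in range(b):
--         if t % ms[i] == 0:
--             k -= 1
--             if k == 0:
--                 return i + 1
-- ===== Notes on version B (the rewrite author's own statement) =====
-- stated objective: faster
-- what changed: A simulates the barbers customer by customer (decrementing an idle array and appending to a period table); B returns n outright when 1<=n<=b and otherwise binary-searches the n-th customer's start time t using count(t) = sum(t//ms[i]+1), then picks the (n-count(t-1))-th barber free at t in one index scan.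
-- outside the precondition, e.g. on process(2, 3, [0, 5]): A returns 1, B raises ZeroDivisionError; on process(1, 2, [-1]): A returns 1, B returns None; on process(1, 0, [2]): A returns 1, B returns None
import Mathlib
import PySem

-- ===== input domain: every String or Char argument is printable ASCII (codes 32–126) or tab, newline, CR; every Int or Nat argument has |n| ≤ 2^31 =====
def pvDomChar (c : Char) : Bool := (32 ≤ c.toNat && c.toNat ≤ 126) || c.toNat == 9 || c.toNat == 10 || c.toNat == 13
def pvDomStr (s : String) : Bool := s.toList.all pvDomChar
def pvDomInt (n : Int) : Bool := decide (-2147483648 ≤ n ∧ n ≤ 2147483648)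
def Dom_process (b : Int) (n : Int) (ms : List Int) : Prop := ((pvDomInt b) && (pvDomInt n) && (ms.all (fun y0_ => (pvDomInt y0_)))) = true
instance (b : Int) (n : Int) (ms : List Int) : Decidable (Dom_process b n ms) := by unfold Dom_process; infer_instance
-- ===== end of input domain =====

-- B replaces A's customer-by-customer simulation by a binary search on the start time
-- (count customers startable by time t in one pass over the barbers); objective: faster.

-- ===== PORT A =====
-- [0 for i in range(b)]
def pvZerosA (b : Int) : List Int := (PySem.List.pyRange 0 b 1).map (fun _ => 0)

-- fuel bound for A's while loop (scaffolding only; proved sufficient under Pre_)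
def pvFuelA (b : Int) (ms : List Int) : Nat :=
  ((ms.take b.toNat).foldl (fun a x => a * x.natAbs) 1 + 1) * (b.toNat + 2) + 2

-- the while loop of A; ms[i] / poss[…] are in range under Pre_, so pyGetD's default is unreachable
def pvLoopA (n : Int) (ms : List Int) (b : Int) : Nat → List Int → Int → List Int → Int
  | 0, _, _, _ => 0
  | fuel+1, idle, nxt, poss =>
    if nxt = 1 ∨ idle ≠ pvZerosA b then
      if (0:Int) ∈ idle then
        -- for i in range(b): first i with idle[i] == 0, then break
        let i := idle.idxOf 0
        if nxt = n then (i : Int) + 1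
        else pvLoopA n ms b fuel (idle.set i (PySem.List.pyGetD ms (i : Int) 0)) (nxt + 1)
               (poss ++ [(i : Int) + 1])
      else
        let m := (PySem.List.min? idle (fun x => x)).getD 0
        pvLoopA n ms b fuel (idle.map (fun x => x - m)) nxt poss
    else
      PySem.List.pyGetD poss (PySem.Int.mod n (nxt - 1) - 1) 0

def process (b : Int) (n : Int) (ms : List Int) : Int :=
  pvLoopA n ms b (pvFuelA b ms) (pvZerosA b) 1 []

-- ===== PORT B =====
-- count(t) = sum(t // ms[i] + 1 for i in range(b))
def pvCountB (b : Int) (ms : List Int) (t : Int) : Int :=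
  ((PySem.List.pyRange 0 b 1).map
    (fun i => PySem.Int.floordiv t (PySem.List.pyGetD ms i 0) + 1)).sum

-- while hi - lo > 1: mid = (lo + hi) // 2; …
def pvBsearchB (b : Int) (n : Int) (ms : List Int) (lo hi : Int) : Int :=
  if 1 < hi - lo then
    if n ≤ pvCountB b ms (PySem.Int.floordiv (lo + hi) 2) then
      pvBsearchB b n ms lo (PySem.Int.floordiv (lo + hi) 2)
    else
      pvBsearchB b n ms (PySem.Int.floordiv (lo + hi) 2) hi
  else hi
termination_by (hi - lo).toNat
decreasing_by
  all_goals
    simp only [PySem.Int.floordiv_eq_ediv_of_pos (by omega : (0:Int) < 2)]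
    omega

-- for i in range(b): if t % ms[i] == 0: k -= 1; if k == 0: return i + 1
def pvScanB (ms : List Int) (t : Int) : List Int → Int → Option Int
  | [], _ => none
  | i :: rest, k =>
    if PySem.Int.mod t (PySem.List.pyGetD ms i 0) = 0 then
      if k - 1 = 0 then some (i + 1) else pvScanB ms t rest (k - 1)
    else pvScanB ms t rest k

def process_alt (b : Int) (n : Int) (ms : List Int) : Int :=
  if 1 ≤ n ∧ n ≤ b then n
  else
  let t : Int :=
    if n ≤ pvCountB b ms 0 then 0
    else
      -- lo, hi = 0, max(ms[:b]) * n
      pvBsearchB b n ms 0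
        ((PySem.List.max? (PySem.List.slice ms none (some b)) (fun x => x)).getD 0 * n)
  let k := n - (if 0 < t then pvCountB b ms (t - 1) else 0)
  (pvScanB ms t (PySem.List.pyRange 0 b 1) k).getD 0

-- ===== PRECONDITION & SPEC =====
-- Pre_ restricts to the problem's natural domain: at least one barber, a positive customer
-- number n, and either n ≤ b with the first n-1 durations nonzero (customer n is served at
-- time 0, before any further duration is read) or a positive duration for each of the b
-- barbers. Outside it A raises (b ≤ 0; too few durations), diverges, or returns accidental
-- artefacts of its simulation (zero or negative durations, negative-index wraparound for
-- n ≤ 0), where B itself raises, returns no int, or returns the intended barber.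
def Pre_process (b : Int) (n : Int) (ms : List Int) : Prop :=
  1 ≤ b ∧ 1 ≤ n ∧
    ((n ≤ b ∧ n - 1 ≤ (ms.length : Int) ∧ ∀ x ∈ ms.take (n-1).toNat, x ≠ 0) ∨
     (b ≤ (ms.length : Int) ∧ ∀ x ∈ ms.take b.toNat, 1 ≤ x))
instance (b : Int) (n : Int) (ms : List Int) : Decidable (Pre_process b n ms) := by
  unfold Pre_process; infer_instance

def pvWitness_process : Int × Int × List Int := (2, 7, [3, 2])

def Spec_process (b : Int) (n : Int) (ms : List Int) (out : Int) : Prop := out = process_alt b n ms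
instance (b : Int) (n : Int) (ms : List Int) (out : Int) : Decidable (Spec_process b n ms out) := by
  unfold Spec_process; infer_instance

-- ===== CLAIM (what is proved, stated in full; the proofs are below) =====
def Claim_equal_process : Prop := ∀ (b : Int) (n : Int) (ms : List Int), Dom_process b n ms → Pre_process b n ms → Spec_process b n ms (process b n ms)

-- ===== LEMMAS AND PROOFS =====

-- ---- Nat-level theory of the barber schedule ----
-- duration of barber i (default 1 is never read at i < M.length)
def pvDur (M : List Nat) (i : Nat) : Nat := M.getD i 1

-- number of customers that can START by time t (inclusive)
def pvCnt (M : List Nat) (t : Nat) : Nat :=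
  ((List.range M.length).map (fun i => t / pvDur M i + 1)).sum

theorem pvBsearch_lemma {b n : Int} {ms : List Int} (hb : 1 ≤ b) (hlen : b ≤ (ms.length : Int))
    (hpos : ∀ x ∈ ms.take b.toNat, 1 ≤ x) :
    ∀ (lo hi : Int), 0 ≤ lo → lo < hi → pvCountB b ms lo < n → n ≤ pvCountB b ms hi →
      0 < pvBsearchB b n ms lo hi ∧
      pvCountB b ms (pvBsearchB b n ms lo hi - 1) < n ∧
      n ≤ pvCountB b ms (pvBsearchB b n ms lo hi) := by
  intro lo hi
  generalize hm : (hi - lo).toNat = fuel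
  induction fuel using Nat.strong_induction_on generalizing lo hi with
  | _ fuel ih =>
      intro hlo0 hlohi hlo hhi
      subst hm
      rw [pvBsearchB]
      by_cases hgap : 1 < hi - lo
      · rw [if_pos hgap]
        have hmid := PySem.Int.floordiv_eq_ediv_of_pos (a := lo + hi) (by omega : (0:Int) < 2)
        have hmlo : lo < PySem.Int.floordiv (lo + hi) 2 := by rw [hmid]; omega
        have hmhi : PySem.Int.floordiv (lo + hi) 2 < hi := by rw [hmid]; omega
        by_cases hc : n ≤ pvCountB b ms (PySem.Int.floordiv (lo + hi) 2)
        · rw [if_pos hc]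
          exact ih ((PySem.Int.floordiv (lo + hi) 2 - lo).toNat) (by omega) lo _ rfl hlo0 hmlo hlo hc
        · rw [if_neg hc]
          exact ih ((hi - PySem.Int.floordiv (lo + hi) 2).toNat) (by omega) _ hi rfl
            (by omega) hmhi (by omega) hhi
      · rw [if_neg hgap]
        have hlohi1 : lo = hi - 1 := by omega
        refine ⟨by omega, ?_, hhi⟩
        rw [← hlohi1]
        exact hlo

-- barbers free (starting a cut) at time t, in index order
def pvFree (M : List Nat) (t : Nat) : List Nat :=
  (List.range M.length).filter (fun i => t % pvDur M i = 0)

-- customers started STRICTLY before time t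
def pvCb (M : List Nat) : Nat → Nat
  | 0 => 0
  | t+1 => pvCnt M t

-- r is the (1-based) barber serving customer n
def pvIsAns (M : List Nat) (n : Nat) (r : Int) : Prop :=
  ∃ t, pvCb M t < n ∧ n ≤ pvCnt M t ∧
    r = (((pvFree M t).getD (n - pvCb M t - 1) 0 : Nat) : Int) + 1

theorem pvDur_pos {M : List Nat} (hM : ∀ m ∈ M, 1 ≤ m) (i : Nat) : 1 ≤ pvDur M i := by
  unfold pvDur
  rcases Nat.lt_or_ge i M.length with h | h
  · simpa [List.getD_eq_getElem?_getD, List.getElem?_eq_getElem h] using hM _ (List.getElem_mem h)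
  · simp [List.getD_eq_getElem?_getD, List.getElem?_eq_none h]

theorem pvFree_sorted (M : List Nat) (t : Nat) : (pvFree M t).Pairwise (· < ·) :=
  (List.pairwise_lt_range).filter _

theorem pvMem_free {M : List Nat} {t i : Nat} :
    i ∈ pvFree M t ↔ i < M.length ∧ t % pvDur M i = 0 := by
  simp [pvFree, List.mem_filter, List.mem_range]

theorem pvFree_zero (M : List Nat) : pvFree M 0 = List.range M.length := by
  simp [pvFree]

theorem pvCnt_zero (M : List Nat) : pvCnt M 0 = M.length := by
  simp [pvCnt, List.map_const']

-- Σ over a list splits into old sum + number of indices that become free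
theorem pvSumSplit (f1 f0 : Nat → Nat) (p : Nat → Bool)
    (h : ∀ i, f1 i = f0 i + (if p i then 1 else 0)) :
    ∀ L : List Nat, (L.map f1).sum = (L.map f0).sum + (L.filter p).length := by
  intro L
  induction L with
  | nil => simp
  | cons x xs ih =>
      by_cases hp : p x <;> simp [hp, h x, ih] <;> omega

theorem pvCnt_succ {M : List Nat} (hM : ∀ m ∈ M, 1 ≤ m) (t : Nat) :
    pvCnt M (t+1) = pvCnt M t + (pvFree M (t+1)).length := by
  unfold pvCnt pvFree
  rw [pvSumSplit (fun i => (t+1) / pvDur M i + 1) (fun i => t / pvDur M i + 1)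
        (fun i => decide ((t+1) % pvDur M i = 0)) ?_]
  intro i
  have hd := pvDur_pos hM i
  show (t+1) / pvDur M i + 1 =
      (t / pvDur M i + 1) + if decide ((t+1) % pvDur M i = 0) = true then 1 else 0
  rw [Nat.succ_div]
  by_cases hdv : pvDur M i ∣ t + 1
  · simp [hdv, Nat.dvd_iff_mod_eq_zero.mp hdv]
  · have : ¬ (t+1) % pvDur M i = 0 := fun h => hdv (Nat.dvd_of_mod_eq_zero h)
    simp [hdv, this]

theorem pvCnt_eq {M : List Nat} (hM : ∀ m ∈ M, 1 ≤ m) (t : Nat) :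
    pvCnt M t = pvCb M t + (pvFree M t).length := by
  cases t with
  | zero => simp [pvCnt_zero, pvFree_zero, pvCb]
  | succ u => simpa [pvCb] using pvCnt_succ hM u

theorem pvCnt_mono (M : List Nat) {t s : Nat} (h : t ≤ s) : pvCnt M t ≤ pvCnt M s := by
  unfold pvCnt
  apply List.sum_le_sum
  intro i _
  have := Nat.div_le_div_right (c := pvDur M i) h
  omega

theorem pvCb_mono (M : List Nat) {t s : Nat} (h : t ≤ s) : pvCb M t ≤ pvCb M s := by
  cases t with
  | zero => simp [pvCb]
  | succ u =>
      cases s with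
      | zero => omega
      | succ v => exact pvCnt_mono M (by omega)

theorem pvAns_unique {M : List Nat} (hM : ∀ m ∈ M, 1 ≤ m) {n : Nat} {r1 r2 : Int}
    (h1 : pvIsAns M n r1) (h2 : pvIsAns M n r2) : r1 = r2 := by
  obtain ⟨t1, h1a, h1b, h1c⟩ := h1
  obtain ⟨t2, h2a, h2b, h2c⟩ := h2
  have hte : t1 = t2 := by
    rcases Nat.lt_trichotomy t1 t2 with h | h | h
    · have h2 : pvCb M (t1+1) ≤ pvCb M t2 := pvCb_mono M (by omega)
      have h3 : pvCb M (t1+1) = pvCnt M t1 := rfl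
      omega
    · exact h
    · have h2 : pvCb M (t2+1) ≤ pvCb M t1 := pvCb_mono M (by omega)
      have h3 : pvCb M (t2+1) = pvCnt M t2 := rfl
      omega
  subst hte
  rw [h1c, h2c]

-- ---- periodicity ----
theorem pvFree_period {M : List Nat} {T : Nat}
    (hdvd : ∀ i < M.length, T % pvDur M i = 0) (t : Nat) :
    pvFree M (t + T) = pvFree M t := by
  unfold pvFree
  apply List.filter_congr
  intro i hi
  have := hdvd i (List.mem_range.mp hi)
  simp [Nat.add_mod, this]

theorem pvCb_as_sum {M : List Nat} (hM : ∀ m ∈ M, 1 ≤ m) {T : Nat} (hT : 1 ≤ T)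
    (hdvd : ∀ i < M.length, T % pvDur M i = 0) :
    pvCb M T = ((List.range M.length).map (fun i => T / pvDur M i)).sum := by
  obtain ⟨S, rfl⟩ : ∃ S, T = S + 1 := ⟨T - 1, by omega⟩
  show pvCnt M S = _
  unfold pvCnt
  apply congrArg
  apply List.map_congr_left
  intro i hi
  have hdv : pvDur M i ∣ S + 1 := Nat.dvd_of_mod_eq_zero (hdvd i (List.mem_range.mp hi))
  rw [Nat.succ_div]
  simp [hdv]

theorem pvCnt_period {M : List Nat} (hM : ∀ m ∈ M, 1 ≤ m) {T : Nat} (hT : 1 ≤ T)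
    (hdvd : ∀ i < M.length, T % pvDur M i = 0) (t : Nat) :
    pvCnt M (t + T) = pvCnt M t + pvCb M T := by
  unfold pvCnt
  have hsplit : ∀ i ∈ List.range M.length,
      (fun i => (t + T) / pvDur M i + 1) i = (fun i => (t / pvDur M i + 1) + T / pvDur M i) i := by
    intro i hi
    have hdv : pvDur M i ∣ T := Nat.dvd_of_mod_eq_zero (hdvd i (List.mem_range.mp hi))
    have hd := pvDur_pos hM i
    obtain ⟨k, rfl⟩ := hdv
    show (t + pvDur M i * k) / pvDur M i + 1 = t / pvDur M i + 1 + pvDur M i * k / pvDur M i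
    rw [Nat.add_mul_div_left _ _ (by omega), Nat.mul_div_cancel_left _ (by omega)]
    ring
  rw [List.map_congr_left hsplit, List.sum_map_add, pvCb_as_sum hM hT hdvd]

theorem pvCb_period {M : List Nat} (hM : ∀ m ∈ M, 1 ≤ m) {T : Nat} (hT : 1 ≤ T)
    (hdvd : ∀ i < M.length, T % pvDur M i = 0) (t : Nat) :
    pvCb M (t + T) = pvCb M t + pvCb M T := by
  cases t with
  | zero => simp [pvCb]
  | succ u =>
      have h1 : u + 1 + T = (u + T) + 1 := by omega
      rw [h1]
      show pvCnt M (u + T) = pvCnt M u + pvCb M T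
      exact pvCnt_period hM hT hdvd u

theorem pvIsAns_shift {M : List Nat} (hM : ∀ m ∈ M, 1 ≤ m) {T : Nat} (hT : 1 ≤ T)
    (hdvd : ∀ i < M.length, T % pvDur M i = 0) {m : Nat} {r : Int}
    (h : pvIsAns M m r) : pvIsAns M (m + pvCb M T) r := by
  obtain ⟨t, h1, h2, h3⟩ := h
  refine ⟨t + T, ?_, ?_, ?_⟩
  · rw [pvCb_period hM hT hdvd]; omega
  · rw [pvCnt_period hM hT hdvd]; omega
  · rw [pvFree_period hdvd]
    have hidx : m + pvCb M T - pvCb M (t + T) - 1 = m - pvCb M t - 1 := by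
      rw [pvCb_period hM hT hdvd]; omega
    rw [hidx]; exact h3

theorem pvIsAns_shift_mul {M : List Nat} (hM : ∀ m ∈ M, 1 ≤ m) {T : Nat} (hT : 1 ≤ T)
    (hdvd : ∀ i < M.length, T % pvDur M i = 0) {m : Nat} {r : Int} (c : Nat)
    (h : pvIsAns M m r) : pvIsAns M (m + pvCb M T * c) r := by
  induction c with
  | zero => simpa using h
  | succ c ih =>
      have h2 := pvIsAns_shift hM hT hdvd ih
      have : m + pvCb M T * (c + 1) = m + pvCb M T * c + pvCb M T := by ring
      rwa [this]

-- ---- the list of customers of one full period ----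
def pvFlat (M : List Nat) (T : Nat) : List Nat := (List.range T).flatMap (pvFree M)

theorem pvFlat_len {M : List Nat} (hM : ∀ m ∈ M, 1 ≤ m) (T : Nat) :
    (pvFlat M T).length = pvCb M T := by
  induction T with
  | zero => simp [pvFlat, pvCb]
  | succ T ih =>
      have h1 : pvFlat M (T+1) = pvFlat M T ++ pvFree M T := by
        unfold pvFlat
        rw [List.range_succ, List.flatMap_append]
        simp
      rw [h1, List.length_append, ih]
      show pvCb M T + (pvFree M T).length = pvCnt M T
      rw [pvCnt_eq hM]

theorem pvFlat_ans {M : List Nat} (hM : ∀ m ∈ M, 1 ≤ m) (T : Nat) :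
    ∀ m < pvCb M T, pvIsAns M (m+1) (((pvFlat M T).getD m 0 : Int) + 1) := by
  induction T with
  | zero => intro m hm; simp [pvCb] at hm
  | succ T ih =>
      intro m hm
      have h1 : pvFlat M (T+1) = pvFlat M T ++ pvFree M T := by
        unfold pvFlat
        rw [List.range_succ, List.flatMap_append]
        simp
      have hlen := pvFlat_len hM (M := M) T
      rcases Nat.lt_or_ge m (pvCb M T) with h | h
      · rw [h1, List.getD_append _ _ _ _ (by omega)]
        exact ih m h
      · have hm2 : m < pvCnt M T := hm
        have hcnt := pvCnt_eq hM (M := M) T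
        rw [h1, List.getD_append_right _ _ _ _ (by omega), hlen]
        exact ⟨T, by omega, by omega, by
          have : m + 1 - pvCb M T - 1 = m - pvCb M T := by omega
          rw [this]⟩

-- ---- A's loop state ----
def pvEntry (M : List Nat) (T q i : Nat) : Int :=
  if T % pvDur M i = 0 ∧ i ∉ (pvFree M T).take q then 0
  else (pvDur M i : Int) - ((T % pvDur M i : Nat) : Int)

def pvIdle (M : List Nat) (T q : Nat) : List Int := (List.range M.length).map (pvEntry M T q)

def pvPoss (M : List Nat) (T q : Nat) : List Int :=
  ((pvFlat M T) ++ (pvFree M T).take q).map (fun i : Nat => (i : Int) + 1)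

def pvIdleVals (M : List Nat) (T : Nat) : List Nat :=
  (List.range M.length).map (fun i => pvDur M i - T % pvDur M i)

theorem pvIdxOf_spec (l : List Int) (n : Nat) (x : Int) (h : n < l.length)
    (h1 : l[n]? = some x) (h2 : ∀ m, m < n → l[m]? ≠ some x) : l.idxOf x = n := by
  induction l generalizing n with
  | nil => simp at h
  | cons a as ih =>
      cases n with
      | zero =>
          have : a = x := by simpa using h1
          simp [List.idxOf_cons, this]
      | succ n =>
          have ha : a ≠ x := by
            have := h2 0 (by omega)
            simpa using this
          have hbeq : (a == x) = false := by simpa using ha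
          rw [List.idxOf_cons, hbeq]
          simp only [cond_false]
          have := ih n (by simpa using h) (by simpa using h1)
            (fun m hm => by have := h2 (m+1) (by omega); simpa using this)
          omega

theorem pvIdle_len (M : List Nat) (T q : Nat) : (pvIdle M T q).length = M.length := by
  simp [pvIdle]

theorem pvFq_not_take {M : List Nat} {T q : Nat} (hq : q < (pvFree M T).length) :
    (pvFree M T)[q] ∉ (pvFree M T).take q := by
  intro hmem
  rw [List.mem_take_iff_getElem] at hmem
  obtain ⟨j, hj, hje⟩ := hmem
  have hs := (List.pairwise_iff_getElem).mp (pvFree_sorted M T)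
  have := hs j q (by omega) hq (by omega)
  omega

theorem pvMem_take_of_lt {M : List Nat} {T q i : Nat} (hq : q < (pvFree M T).length)
    (hi : i ∈ pvFree M T) (hlt : i < (pvFree M T)[q]) : i ∈ (pvFree M T).take q := by
  rw [List.mem_iff_getElem] at hi
  obtain ⟨j, hj, hje⟩ := hi
  have hs := (List.pairwise_iff_getElem).mp (pvFree_sorted M T)
  have hjq : j < q := by
    by_contra hge
    rcases Nat.lt_or_ge q j with h' | h'
    · have := hs q j hq hj h'
      omega
    · have : q = j := by omega
      subst this
      omega
  rw [List.mem_take_iff_getElem]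
  exact ⟨j, by omega, hje⟩

theorem pvStep_mod {d T δ : Nat} (hd : 1 ≤ d) (hd1 : 1 ≤ δ) (hdle : δ ≤ d - T % d) :
    ((T + δ) % d = 0 → d - T % d = δ) ∧ ((T + δ) % d ≠ 0 → (T + δ) % d = T % d + δ) := by
  have hdm := Nat.div_add_mod T d
  have hmlt : T % d < d := Nat.mod_lt _ (by omega)
  rcases Nat.lt_or_ge δ (d - T % d) with hlt | hge
  · have h1 : T + δ = d * (T / d) + (T % d + δ) := by omega
    have h2 : (T + δ) % d = (T % d + δ) % d := by rw [h1, Nat.mul_add_mod]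
    have h3 : (T % d + δ) % d = T % d + δ := Nat.mod_eq_of_lt (by omega)
    exact ⟨fun h0 => by omega, fun _ => by omega⟩
  · have h1 : T + δ = d * (T / d) + d := by omega
    have h2 : (T + δ) % d = 0 := by
      have h3 : d * (T / d) + d = d * (T / d + 1) := by ring
      rw [h1, h3, Nat.mul_mod_right]
    exact ⟨fun _ => by omega, fun h0 => absurd h2 h0⟩

theorem pvEntry_zero_iff {M : List Nat} (hM : ∀ m ∈ M, 1 ≤ m) (T q i : Nat) :
    pvEntry M T q i = 0 ↔ (T % pvDur M i = 0 ∧ i ∉ (pvFree M T).take q) := by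
  have hd := pvDur_pos hM i
  have hm : T % pvDur M i < pvDur M i := Nat.mod_lt _ (by omega)
  unfold pvEntry
  split_ifs with h
  · simp [h]
  · constructor
    · intro hz
      exfalso
      omega
    · intro hc
      exact absurd hc h

theorem pvZero_mem_iff {M : List Nat} (hM : ∀ m ∈ M, 1 ≤ m) {T q : Nat}
    (hq : q ≤ (pvFree M T).length) :
    (0:Int) ∈ pvIdle M T q ↔ q < (pvFree M T).length := by
  unfold pvIdle
  rw [List.mem_map]
  constructor
  · rintro ⟨i, hmem, hie⟩
    have hi := List.mem_range.mp hmem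
    obtain ⟨hmod, hnt⟩ := (pvEntry_zero_iff hM T q i).mp hie
    have hfm : i ∈ pvFree M T := pvMem_free.mpr ⟨hi, hmod⟩
    rcases Nat.lt_or_ge q (pvFree M T).length with h | h
    · exact h
    · exfalso
      have : q = (pvFree M T).length := by omega
      subst this
      rw [List.take_length] at hnt
      exact hnt hfm
  · intro h0
    have hfq := List.getElem_mem h0
    obtain ⟨hflen, hfmod⟩ := pvMem_free.mp hfq
    exact ⟨(pvFree M T)[q], List.mem_range.mpr hflen,
      (pvEntry_zero_iff hM T q _).mpr ⟨hfmod, pvFq_not_take h0⟩⟩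

theorem pvIdle_eq_zeros_iff {M : List Nat} (hM : ∀ m ∈ M, 1 ≤ m) (hlen : 1 ≤ M.length)
    {T q : Nat} (hq : q ≤ (pvFree M T).length) :
    pvIdle M T q = List.replicate M.length 0 ↔
      (q = 0 ∧ ∀ i < M.length, T % pvDur M i = 0) := by
  constructor
  · intro he
    have hpt : ∀ i, i < M.length → pvEntry M T q i = 0 := by
      intro i hi
      have h1 := congrArg (fun l => l[i]?) he
      simp only [pvIdle, List.getElem?_map, List.getElem?_range, hi, if_pos,
        List.getElem?_replicate] at h1
      simpa [hi] using h1
    have hall : ∀ i < M.length, T % pvDur M i = 0 := by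
      intro i hi
      exact ((pvEntry_zero_iff hM T q i).mp (hpt i hi)).1
    refine ⟨?_, hall⟩
    by_contra hq0
    have hflen : 0 < (pvFree M T).length := by omega
    have hf0 := List.getElem_mem hflen
    obtain ⟨hlt, _⟩ := pvMem_free.mp hf0
    have hnt := ((pvEntry_zero_iff hM T q _).mp (hpt _ hlt)).2
    exact hnt (List.mem_take_iff_getElem.mpr ⟨0, by omega, rfl⟩)
  · rintro ⟨rfl, hall⟩
    apply List.ext_getElem (by simp [pvIdle])
    intro i h1 h2
    have hi : i < M.length := by simpa [pvIdle] using h1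
    simp [pvIdle, pvEntry, hall i hi]

theorem pvIdxOf_idle {M : List Nat} (hM : ∀ m ∈ M, 1 ≤ m) {T q : Nat}
    (hq : q < (pvFree M T).length) :
    (pvIdle M T q).idxOf 0 = (pvFree M T).getD q 0 := by
  have hfq := List.getElem_mem hq
  obtain ⟨hflen, hfmod⟩ := pvMem_free.mp hfq
  rw [List.getD_eq_getElem _ _ hq]
  apply pvIdxOf_spec _ _ _ (by rw [pvIdle_len]; exact hflen)
  · rw [List.getElem?_eq_getElem (by rw [pvIdle_len]; exact hflen)]
    have h0 : pvEntry M T q ((pvFree M T)[q]) = 0 :=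
      (pvEntry_zero_iff hM T q _).mpr ⟨hfmod, pvFq_not_take hq⟩
    simp [pvIdle, h0]
  · intro m hm hcon
    have hmlen : m < M.length := by omega
    rw [List.getElem?_eq_getElem (by rw [pvIdle_len]; exact hmlen)] at hcon
    have hme : pvEntry M T q m = 0 := by
      have h1 : (pvIdle M T q)[m]'(by rw [pvIdle_len]; exact hmlen) = pvEntry M T q m := by
        simp [pvIdle]
      rw [h1] at hcon
      exact Option.some_injective _ hcon
    obtain ⟨hmod, hnt⟩ := (pvEntry_zero_iff hM T q m).mp hme
    exact hnt (pvMem_take_of_lt hq (pvMem_free.mpr ⟨hmlen, hmod⟩) hm)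

theorem pvSet_idle {M : List Nat} (hM : ∀ m ∈ M, 1 ≤ m) {T q : Nat}
    (hq : q < (pvFree M T).length) :
    (pvIdle M T q).set ((pvFree M T).getD q 0)
        ((pvDur M ((pvFree M T).getD q 0) : Nat) : Int) = pvIdle M T (q+1) := by
  have hfq := List.getElem_mem hq
  obtain ⟨hflen, hfmod⟩ := pvMem_free.mp hfq
  have htk : (pvFree M T).take (q+1) = (pvFree M T).take q ++ [(pvFree M T)[q]] := by
    rw [List.take_succ, List.getElem?_eq_getElem hq]
    rfl
  rw [List.getD_eq_getElem _ _ hq]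
  apply List.ext_getElem (by simp [pvIdle])
  intro i h1 h2
  have hi : i < M.length := by
    have := h1
    rw [List.length_set, pvIdle_len] at this
    exact this
  have hR : (pvIdle M T (q+1))[i]'h2 = pvEntry M T (q+1) i := by
    simp [pvIdle]
  rw [hR, List.getElem_set]
  by_cases hiq : (pvFree M T)[q] = i
  · subst hiq
    rw [if_pos rfl]
    have hnc : ¬ (T % pvDur M ((pvFree M T)[q]) = 0 ∧
        (pvFree M T)[q] ∉ (pvFree M T).take (q+1)) := by
      rintro ⟨-, hnt⟩
      exact hnt (by rw [htk]; exact List.mem_append_right _ (List.mem_singleton_self _))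
    unfold pvEntry
    rw [if_neg hnc, hfmod]
    simp
  · rw [if_neg hiq]
    have hL : (pvIdle M T q)[i]'(by rw [pvIdle_len]; exact hi) = pvEntry M T q i := by
      simp [pvIdle]
    rw [hL]
    have hcond : (T % pvDur M i = 0 ∧ i ∉ (pvFree M T).take q) ↔
        (T % pvDur M i = 0 ∧ i ∉ (pvFree M T).take (q+1)) := by
      apply and_congr_right
      intro _
      rw [htk]
      constructor
      · intro hn hmem
        rcases List.mem_append.mp hmem with h | h
        · exact hn h
        · exact hiq (List.mem_singleton.mp h).symm
      · intro hn hmem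
        exact hn (List.mem_append_left _ hmem)
    unfold pvEntry
    exact if_congr hcond rfl rfl

theorem pvPoss_succ {M : List Nat} {T q : Nat} (hq : q < (pvFree M T).length) :
    pvPoss M T (q+1) = pvPoss M T q ++ [(((pvFree M T).getD q 0 : Nat) : Int) + 1] := by
  unfold pvPoss
  rw [List.take_succ, List.getElem?_eq_getElem hq, List.getD_eq_getElem _ _ hq]
  rw [show ((some (pvFree M T)[q]).toList) = [(pvFree M T)[q]] from rfl]
  rw [← List.append_assoc, List.map_append]
  rfl

theorem pvIdle_full {M : List Nat} (hM : ∀ m ∈ M, 1 ≤ m) {T : Nat} :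
    pvIdle M T (pvFree M T).length = (pvIdleVals M T).map (fun x : Nat => (x : Int)) := by
  apply List.ext_getElem (by simp [pvIdle, pvIdleVals])
  intro i h1 h2
  have hi : i < M.length := by simpa [pvIdle] using h1
  have hd := pvDur_pos hM i
  have hm : T % pvDur M i < pvDur M i := Nat.mod_lt _ (by omega)
  simp only [pvIdle, pvIdleVals, List.getElem_map, List.getElem_range]
  unfold pvEntry
  rw [List.take_length, if_neg]
  · push_cast [Nat.cast_sub (le_of_lt hm)]
    ring
  · rintro ⟨hmod, hnt⟩
    exact hnt (pvMem_free.mpr ⟨hi, hmod⟩)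

theorem pvFoldl_min_cast : ∀ (xs : List Nat) (x : Nat),
    (List.foldl min ((x : Nat) : Int) (xs.map (fun y : Nat => (y : Int)))) =
      ((List.foldl min x xs : Nat) : Int) := by
  intro xs
  induction xs with
  | nil => intro x; simp
  | cons y ys ih =>
      intro x
      rw [List.map_cons, List.foldl_cons, List.foldl_cons, ← Nat.cast_min, ih]

-- the minimum idle value δ after all free barbers at T have been served
def pvDelta (M : List Nat) (T : Nat) : Nat := ((pvIdleVals M T).min?).getD 1

theorem pvDelta_pos {M : List Nat} (hM : ∀ m ∈ M, 1 ≤ m) (T : Nat) : 1 ≤ pvDelta M T := by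
  unfold pvDelta
  cases hv : (pvIdleVals M T).min? with
  | none => simp
  | some m =>
      obtain ⟨hmem, -⟩ := List.min?_eq_some_iff.mp hv
      simp only [pvIdleVals, List.mem_map, List.mem_range] at hmem
      obtain ⟨i, hi, hie⟩ := hmem
      have hd := pvDur_pos hM i
      have hmlt : T % pvDur M i < pvDur M i := Nat.mod_lt _ (by omega)
      simp only [Option.getD_some]
      omega

theorem pvDelta_le {M : List Nat} (hM : ∀ m ∈ M, 1 ≤ m) {T i : Nat} (hi : i < M.length) :
    pvDelta M T ≤ pvDur M i - T % pvDur M i := by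
  have hne : (pvIdleVals M T) ≠ [] := by
    simp only [pvIdleVals, ne_eq, List.map_eq_nil_iff, List.range_eq_nil]
    omega
  obtain ⟨m, hv⟩ := Option.ne_none_iff_exists'.mp (mt List.min?_eq_none_iff.mp hne)
  obtain ⟨-, hle⟩ := List.min?_eq_some_iff.mp hv
  have hmem : pvDur M i - T % pvDur M i ∈ pvIdleVals M T := by
    simp only [pvIdleVals, List.mem_map, List.mem_range]
    exact ⟨i, hi, rfl⟩
  have := hle _ hmem
  unfold pvDelta
  rw [hv]
  simpa using this

theorem pvMin_idle {M : List Nat} (hM : ∀ m ∈ M, 1 ≤ m) (hlen : 1 ≤ M.length) (T : Nat) :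
    (PySem.List.min? (pvIdle M T (pvFree M T).length) (fun x => x)).getD 0 =
      ((pvDelta M T : Nat) : Int) := by
  rw [pvIdle_full hM]
  have hne : (pvIdleVals M T) ≠ [] := by
    simp only [pvIdleVals, ne_eq, List.map_eq_nil_iff, List.range_eq_nil]
    omega
  obtain ⟨v, vs, hvv⟩ := List.exists_cons_of_ne_nil hne
  rw [hvv, List.map_cons, PySem.List.min?_id_cons, Option.getD_some, pvFoldl_min_cast]
  unfold pvDelta
  rw [hvv]
  simp [List.min?]

theorem pvAdvance_idle {M : List Nat} (hM : ∀ m ∈ M, 1 ≤ m) (hlen : 1 ≤ M.length) (T : Nat) :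
    (pvIdle M T (pvFree M T).length).map (fun x => x - ((pvDelta M T : Nat) : Int)) =
      pvIdle M (T + pvDelta M T) 0 := by
  rw [pvIdle_full hM]
  apply List.ext_getElem (by simp [pvIdle, pvIdleVals])
  intro i h1 h2
  have hi : i < M.length := by simpa [pvIdleVals] using h1
  have hd := pvDur_pos hM i
  have hm : T % pvDur M i < pvDur M i := Nat.mod_lt _ (by omega)
  have hd1 := pvDelta_pos hM (M := M) T
  have hdle := pvDelta_le hM (T := T) hi
  have hstep := pvStep_mod (T := T) hd hd1 hdle
  simp only [pvIdleVals, pvIdle, List.getElem_map, List.getElem_range]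
  unfold pvEntry
  by_cases h0 : (T + pvDelta M T) % pvDur M i = 0
  · rw [if_pos ⟨h0, by simp⟩]
    have := hstep.1 h0
    omega
  · rw [if_neg (by rintro ⟨hc, -⟩; exact h0 hc)]
    have := hstep.2 h0
    omega

theorem pvFree_between {M : List Nat} (hM : ∀ m ∈ M, 1 ≤ m) {T e : Nat}
    (h1 : 1 ≤ e) (h2 : e < pvDelta M T) : pvFree M (T + e) = [] := by
  unfold pvFree
  rw [List.filter_eq_nil_iff]
  intro i hmem
  have hi := List.mem_range.mp hmem
  have hd := pvDur_pos hM i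
  have hdle := pvDelta_le hM (T := T) hi
  simp only [decide_eq_true_eq]
  intro heq
  have := (pvStep_mod (T := T) hd h1 (by omega)).1 heq
  omega

theorem pvCb_advance {M : List Nat} (hM : ∀ m ∈ M, 1 ≤ m) (hlen : 1 ≤ M.length) {T e : Nat}
    (h1 : 1 ≤ e) (h2 : e ≤ pvDelta M T) : pvCb M (T + e) = pvCnt M T := by
  induction e with
  | zero => omega
  | succ e ih =>
      rcases Nat.eq_zero_or_pos e with rfl | he1
      · rfl
      · have hfr : pvFree M (T + e) = [] := pvFree_between hM he1 (by omega)
        have hcnt := pvCnt_eq hM (M := M) (T + e)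
        have hih := ih he1 (by omega)
        show pvCnt M (T + e) = pvCnt M T
        rw [hcnt, hfr]
        simpa using hih

theorem pvPoss_advance {M : List Nat} (hM : ∀ m ∈ M, 1 ≤ m) (hlen : 1 ≤ M.length) (T : Nat) :
    pvPoss M (T + pvDelta M T) 0 = pvPoss M T (pvFree M T).length := by
  have hflat : ∀ e, 1 ≤ e → e ≤ pvDelta M T → pvFlat M (T + e) = pvFlat M T ++ pvFree M T := by
    intro e
    induction e with
    | zero => omega
    | succ e ih =>
        intro _ h2
        rcases Nat.eq_zero_or_pos e with rfl | he1
        · unfold pvFlat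
          rw [List.range_succ, List.flatMap_append]
          simp
        · have hfr : pvFree M (T + e) = [] := pvFree_between hM he1 (by omega)
          have : pvFlat M (T + (e+1)) = pvFlat M (T + e) ++ pvFree M (T + e) := by
            unfold pvFlat
            rw [show T + (e+1) = (T + e) + 1 from rfl, List.range_succ, List.flatMap_append]
            simp
          rw [this, hfr, ih he1 (by omega), List.append_nil]
  unfold pvPoss
  rw [hflat _ (pvDelta_pos hM T) (le_refl _), List.take_length]
  simp

theorem pvT_advance_le {M : List Nat} (hM : ∀ m ∈ M, 1 ≤ m) (hlen : 1 ≤ M.length)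
    {T : Nat} (hT : T < M.prod) : T + pvDelta M T ≤ M.prod := by
  have hd := pvDur_pos hM 0
  have hdvd : pvDur M 0 ∣ M.prod := by
    have h0 : (0 : Nat) < M.length := hlen
    have : pvDur M 0 = M[0] := List.getD_eq_getElem M 1 h0
    rw [this]
    exact List.dvd_prod (List.getElem_mem h0)
  have hδ := pvDelta_le hM (T := T) hlen
  have hdm := Nat.div_add_mod T (pvDur M 0)
  have hmlt : T % pvDur M 0 < pvDur M 0 := Nat.mod_lt _ (by omega)
  have hdivlt : T / pvDur M 0 < M.prod / pvDur M 0 := Nat.div_lt_div_of_lt_of_dvd hdvd hT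
  have h3 : pvDur M 0 * (T / pvDur M 0 + 1) ≤ pvDur M 0 * (M.prod / pvDur M 0) :=
    Nat.mul_le_mul_left _ (by omega)
  rw [Nat.mul_add, Nat.mul_one] at h3
  have h4 : pvDur M 0 * (M.prod / pvDur M 0) = M.prod := Nat.mul_div_cancel' hdvd
  omega

-- ---- bridge between the Int-level ports and the Nat-level theory ----
-- the Nat durations of the b barbers actually used
def pvM (b : Int) (ms : List Int) : List Nat := (ms.take b.toNat).map Int.toNat

theorem pvM_len {b : Int} {ms : List Int} (hb : 1 ≤ b) (hlen : b ≤ (ms.length : Int)) :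
    (pvM b ms).length = b.toNat := by
  have hbl : b.toNat <= ms.length := by omega
  simp [pvM]
  omega

theorem pvM_pos {b : Int} {ms : List Int} (hpos : ∀ x ∈ ms.take b.toNat, 1 ≤ x) :
    ∀ m ∈ pvM b ms, 1 ≤ m := by
  intro m hm
  simp only [pvM, List.mem_map] at hm
  obtain ⟨x, hx, rfl⟩ := hm
  have := hpos x hx
  omega

theorem pvMs_get {b : Int} {ms : List Int} (hpos : ∀ x ∈ ms.take b.toNat, 1 ≤ x)
    {i : Nat} (hi : i < b.toNat) (hlen : b ≤ (ms.length : Int)) :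
    PySem.List.pyGetD ms (i : Int) 0 = ((pvDur (pvM b ms) i : Nat) : Int) := by
  have hbl : b.toNat <= ms.length := by omega
  have hi2 : i < ms.length := lt_of_lt_of_le hi hbl
  have hmem : ms[i] ∈ ms.take b.toNat :=
    List.mem_take_iff_getElem.mpr ⟨i, by omega, rfl⟩
  have hpos' : 1 <= ms[i] := hpos _ hmem
  rw [PySem.List.pyGetD_natCast, List.getD_eq_getElem _ _ hi2]
  unfold pvDur pvM
  rw [List.getD_eq_getElem _ _ (by simp; omega)]
  simp only [List.getElem_map, List.getElem_take]
  omega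

theorem pvCountB_eq {b : Int} {ms : List Int} (hb : 1 ≤ b) (hlen : b ≤ (ms.length : Int))
    (hpos : ∀ x ∈ ms.take b.toNat, 1 ≤ x) (t : Nat) :
    pvCountB b ms (t : Int) = ((pvCnt (pvM b ms) t : Nat) : Int) := by
  have hML := pvM_len hb hlen
  unfold pvCountB pvCnt
  rw [PySem.List.pyRange_zero, List.map_map, hML]
  rw [Nat.cast_list_sum, List.map_map]
  apply congrArg List.sum
  have hterm : ∀ i ∈ List.range ((b : Int).toNat),
      ((fun i => PySem.Int.floordiv (t : Int) (PySem.List.pyGetD ms i 0) + 1) ∘ fun k : Nat => (k : Int)) i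
        = ((fun x : Nat => (x : Int)) ∘ fun i => t / pvDur (pvM b ms) i + 1) i := by
    intro i hmem
    have hi := List.mem_range.mp hmem
    simp only [Function.comp_apply]
    rw [pvMs_get hpos hi hlen, PySem.Int.floordiv_natCast]
    push_cast
    ring
  exact List.map_congr_left hterm

theorem pvCountB_eq' {b : Int} {ms : List Int} (hb : 1 ≤ b) (hlen : b ≤ (ms.length : Int))
    (hpos : ∀ x ∈ ms.take b.toNat, 1 ≤ x) {t : Int} (ht : 0 ≤ t) :
    pvCountB b ms t = ((pvCnt (pvM b ms) t.toNat : Nat) : Int) := by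
  have h1 := pvCountB_eq hb hlen hpos t.toNat
  rw [Int.toNat_of_nonneg ht] at h1
  exact h1

-- ---- B-side ----

-- barbers free at t among indices a, a+1, …, b-1
def pvFreeFrom (M : List Nat) (t a : Nat) : List Nat :=
  (List.range' a (M.length - a)).filter (fun i => t % pvDur M i = 0)

theorem pvFreeFrom_zero (M : List Nat) (t : Nat) : pvFreeFrom M t 0 = pvFree M t := by
  simp [pvFreeFrom, pvFree, List.range_eq_range']

theorem pvScan_lemma {b : Int} {ms : List Int} (hb : 1 ≤ b) (hlen : b ≤ (ms.length : Int))
    (hpos : ∀ x ∈ ms.take b.toNat, 1 ≤ x) (tn : Nat) :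
    ∀ (a k : Nat), a ≤ b.toNat → 1 ≤ k → k ≤ (pvFreeFrom (pvM b ms) tn a).length →
      pvScanB ms (tn : Int) (PySem.List.pyRange (a : Int) b 1) (k : Int) =
        some ((((pvFreeFrom (pvM b ms) tn a).getD (k-1) 0 : Nat) : Int) + 1) := by
  have hML := pvM_len hb hlen
  intro a
  generalize hm : b.toNat - a = rest
  induction rest generalizing a with
  | zero =>
      intro k ha hk1 hk2
      exfalso
      have : (pvFreeFrom (pvM b ms) tn a).length = 0 := by
        unfold pvFreeFrom
        rw [hML]
        have : b.toNat - a = 0 := hm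
        rw [this]
        simp
      omega
  | succ rest ih =>
      intro k ha hk1 hk2
      have halt : a < b.toNat := by omega
      have hcons : PySem.List.pyRange (a : Int) b 1 = (a : Int) :: PySem.List.pyRange ((a : Int) + 1) b 1 := by
        apply PySem.List.pyRange_one_cons
        omega
      have hrange : List.range' a ((pvM b ms).length - a) =
          a :: List.range' (a+1) ((pvM b ms).length - (a+1)) := by
        rw [hML]
        rw [show b.toNat - a = (b.toNat - (a+1)) + 1 by omega]
        rw [List.range'_succ]
      have hnext : ((a : Int) + 1) = (((a+1 : Nat) : Nat) : Int) := by push_cast; ring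
      have hgd := pvMs_get hpos halt hlen
      rw [hcons]
      show (if PySem.Int.mod (tn : Int) (PySem.List.pyGetD ms (a : Int) 0) = 0 then
              (if (k : Int) - 1 = 0 then some ((a : Int) + 1)
               else pvScanB ms (tn : Int) (PySem.List.pyRange ((a : Int) + 1) b 1) ((k : Int) - 1))
            else pvScanB ms (tn : Int) (PySem.List.pyRange ((a : Int) + 1) b 1) (k : Int)) = _
      rw [hgd, PySem.Int.mod_natCast]
      by_cases hfr : tn % pvDur (pvM b ms) a = 0
      · rw [if_pos (by exact_mod_cast congrArg (fun x : Nat => (x : Int)) hfr)]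
        have hffcons : pvFreeFrom (pvM b ms) tn a = a :: pvFreeFrom (pvM b ms) tn (a+1) := by
          unfold pvFreeFrom
          rw [hrange, List.filter_cons_of_pos (by simpa using hfr)]
        rcases Nat.eq_or_lt_of_le hk1 with hk1e | hk2e
        · rw [if_pos (by omega)]
          rw [hffcons, ← hk1e]
          simp
        · rw [if_neg (by omega)]
          have hkc : (k : Int) - 1 = ((k - 1 : Nat) : Int) := by omega
          rw [hkc, hnext]
          rw [ih (a+1) (by omega) (k-1) (by omega) (by omega)
            (by rw [hffcons] at hk2; simp at hk2; omega)]
          rw [hffcons]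
          have h10 : k - 1 - 1 = k - 2 := by omega
          have h11 : (a :: pvFreeFrom (pvM b ms) tn (a+1)).getD (k-1) 0 =
              (pvFreeFrom (pvM b ms) tn (a+1)).getD (k-2) 0 := by
            rw [show k - 1 = (k - 2) + 1 by omega, List.getD_cons_succ]
          rw [h10, h11]
      · rw [if_neg (by
          intro hcon
          exact hfr (by exact_mod_cast hcon))]
        have hffskip : pvFreeFrom (pvM b ms) tn a = pvFreeFrom (pvM b ms) tn (a+1) := by
          unfold pvFreeFrom
          rw [hrange, List.filter_cons_of_neg (by simpa using hfr)]
        rw [hnext, ih (a+1) (by omega) k (by omega) hk1 (by rw [← hffskip]; exact hk2)]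
        rw [hffskip]

theorem pvAlt_isAns {b n : Int} {ms : List Int}
    (hb : 1 ≤ b) (hlen : b ≤ (ms.length : Int)) (hn : 1 ≤ n)
    (hpos : ∀ x ∈ ms.take b.toNat, 1 ≤ x) (hnb : ¬ n ≤ b) :
    pvIsAns (pvM b ms) n.toNat (process_alt b n ms) := by
  have hM := pvM_pos (b := b) hpos
  have hML := pvM_len hb hlen
  have hlen1 : 1 ≤ (pvM b ms).length := by omega
  have hn' : 1 ≤ n.toNat := by omega
  have hd0p := pvDur_pos hM 0
  have h0len : 0 < ms.length := by omega
  have hm0mem : ms[0]'h0len ∈ ms.take b.toNat := List.mem_take_iff_getElem.mpr ⟨0, by omega, rfl⟩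
  have hms0 : 1 ≤ ms[0]'h0len := hpos _ hm0mem
  have hdur0 : pvDur (pvM b ms) 0 = (ms[0]'h0len).toNat := by
    have h0l : 0 < (pvM b ms).length := by omega
    have he : pvDur (pvM b ms) 0 = (pvM b ms)[0] := List.getD_eq_getElem _ 1 h0l
    rw [he]
    simp [pvM, List.getElem_take]
  -- the maximum duration of the b barbers
  have hsl : PySem.List.slice ms none (some b) = ms.take b.toNat := PySem.List.slice_to ms (by omega)
  obtain ⟨mx, hmx⟩ : ∃ m, PySem.List.max? (ms.take b.toNat) (fun x => x) = some m := by
    cases hv : PySem.List.max? (ms.take b.toNat) (fun x => x) with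
    | none =>
        exfalso
        have hlist := (PySem.List.max?_eq_none_iff _ _).mp hv
        have hlen0 : (ms.take b.toNat).length = 0 := by rw [hlist]; rfl
        rw [List.length_take] at hlen0
        omega
    | some m => exact ⟨m, rfl⟩
  have hmx0 : ms[0]'h0len ≤ mx := PySem.List.max?_isMax hmx _ hm0mem
  have hbound : n ≤ pvCountB b ms
      ((PySem.List.max? (PySem.List.slice ms none (some b)) (fun x => x)).getD 0 * n) := by
    rw [hsl, hmx, Option.getD_some]
    have hcast : mx * n = (((mx.toNat * n.toNat : Nat)) : Int) := by
      push_cast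
      rw [Int.toNat_of_nonneg (by omega), Int.toNat_of_nonneg (by omega)]
    rw [hcast, pvCountB_eq hb hlen hpos]
    have hmem : mx.toNat * n.toNat / pvDur (pvM b ms) 0 + 1 ∈
        (List.range (pvM b ms).length).map
          (fun i => mx.toNat * n.toNat / pvDur (pvM b ms) i + 1) :=
      List.mem_map.mpr ⟨0, List.mem_range.mpr (by omega), rfl⟩
    have hsum := List.single_le_sum (fun x _ => Nat.zero_le x) _ hmem
    have hdiv : n.toNat ≤ mx.toNat * n.toNat / pvDur (pvM b ms) 0 := by
      rw [Nat.le_div_iff_mul_le (by omega)]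
      have h1 : pvDur (pvM b ms) 0 ≤ mx.toNat := by omega
      calc n.toNat * pvDur (pvM b ms) 0 ≤ n.toNat * mx.toNat :=
            Nat.mul_le_mul_left _ h1
        _ = mx.toNat * n.toNat := Nat.mul_comm _ _
    have hcnt : n.toNat ≤ pvCnt (pvM b ms) (mx.toNat * n.toNat) := by
      unfold pvCnt
      omega
    omega
  unfold process_alt
  rw [if_neg (fun hc => hnb hc.2)]
  by_cases h0 : n ≤ pvCountB b ms 0
  · rw [if_pos h0]
    have hc0 : pvCountB b ms 0 = ((pvCnt (pvM b ms) 0 : Nat) : Int) := by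
      rw [show (0:Int) = ((0:Nat):Int) from rfl, pvCountB_eq hb hlen hpos]
    have hk2 : n.toNat ≤ (pvFreeFrom (pvM b ms) 0 0).length := by
      rw [pvFreeFrom_zero, pvFree_zero, List.length_range]
      rw [hc0, pvCnt_zero] at h0
      omega
    have hsc := pvScan_lemma hb hlen hpos 0 0 n.toNat (by omega) hn' hk2
    rw [show (((0:Nat)) : Int) = (0:Int) from rfl] at hsc
    rw [show ((n.toNat : Nat) : Int) = n from by omega] at hsc
    show pvIsAns (pvM b ms) n.toNat
      ((pvScanB ms 0 (PySem.List.pyRange 0 b 1)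
        (n - if (0:Int) < 0 then pvCountB b ms (0 - 1) else 0)).getD 0)
    rw [if_neg (by omega : ¬ (0:Int) < 0), sub_zero, hsc, Option.getD_some]
    refine ⟨0, by simp [pvCb]; omega, ?_, ?_⟩
    · rw [hc0] at h0
      omega
    · rw [pvFreeFrom_zero] at *
      have : n.toNat - pvCb (pvM b ms) 0 - 1 = n.toNat - 1 := by simp [pvCb]
      rw [this]
  · rw [if_neg h0]
    have hhi0 : (0:Int) <
        (PySem.List.max? (PySem.List.slice ms none (some b)) (fun x => x)).getD 0 * n := by
      rw [hsl, hmx, Option.getD_some]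
      exact mul_pos (by omega) (by omega)
    have hbs := pvBsearch_lemma hb hlen hpos 0 _ (le_refl 0) hhi0 (by omega) hbound
    obtain ⟨ht0, htlo, hthi⟩ := hbs
    set t := pvBsearchB b n ms 0
      ((PySem.List.max? (PySem.List.slice ms none (some b)) (fun x => x)).getD 0 * n) with hteq
    have htn1 : 1 ≤ t.toNat := by omega
    obtain ⟨u, hu⟩ : ∃ u, t.toNat = u + 1 := ⟨t.toNat - 1, by omega⟩
    have hcb : pvCb (pvM b ms) t.toNat = pvCnt (pvM b ms) (t.toNat - 1) := by
      rw [hu]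
      rfl
    have hctm : pvCountB b ms (t - 1) = ((pvCb (pvM b ms) t.toNat : Nat) : Int) := by
      rw [pvCountB_eq' hb hlen hpos (t := t - 1) (by omega)]
      rw [show (t - 1).toNat = t.toNat - 1 from by omega, hcb]
    have hct : pvCountB b ms t = ((pvCnt (pvM b ms) t.toNat : Nat) : Int) :=
      pvCountB_eq' hb hlen hpos (by omega)
    have hcblt : pvCb (pvM b ms) t.toNat < n.toNat := by
      rw [hctm] at htlo
      omega
    have hcnge : n.toNat ≤ pvCnt (pvM b ms) t.toNat := by
      rw [hct] at hthi
      omega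
    have hfreelen := pvCnt_eq hM (M := pvM b ms) t.toNat
    have hk2 : n.toNat - pvCb (pvM b ms) t.toNat ≤ (pvFreeFrom (pvM b ms) t.toNat 0).length := by
      rw [pvFreeFrom_zero]
      omega
    have hsc := pvScan_lemma hb hlen hpos t.toNat 0 (n.toNat - pvCb (pvM b ms) t.toNat)
      (by omega) (by omega) hk2
    rw [show (((0:Nat)) : Int) = (0:Int) from rfl] at hsc
    rw [show ((t.toNat : Nat) : Int) = t from by omega] at hsc
    show pvIsAns (pvM b ms) n.toNat
      ((pvScanB ms t (PySem.List.pyRange 0 b 1)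
        (n - if (0:Int) < t then pvCountB b ms (t - 1) else 0)).getD 0)
    rw [if_pos ht0]
    rw [show n - pvCountB b ms (t - 1) = (((n.toNat - pvCb (pvM b ms) t.toNat : Nat)) : Int) from by
      rw [hctm]; omega]
    rw [hsc, Option.getD_some]
    refine ⟨t.toNat, hcblt, hcnge, ?_⟩
    rw [pvFreeFrom_zero] at *

-- ---- A-side ----
theorem pvZerosA_eq {b : Int} : pvZerosA b = List.replicate b.toNat 0 := by
  unfold pvZerosA
  rw [PySem.List.pyRange_zero, List.map_map, List.eq_replicate_iff]
  refine ⟨by simp, ?_⟩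
  intro x hx
  simp only [List.mem_map, Function.comp_apply] at hx
  obtain ⟨i, -, rfl⟩ := hx
  rfl

theorem pvFallback {b n : Int} {ms : List Int} (hb : 1 ≤ b) (hlen : b ≤ (ms.length : Int))
    (hpos : ∀ x ∈ ms.take b.toNat, 1 ≤ x) (hn : 1 ≤ n) {T : Nat} (hT : 1 ≤ T)
    (hdvd : ∀ i < (pvM b ms).length, T % pvDur (pvM b ms) i = 0)
    (hlt : pvCb (pvM b ms) T < n.toNat) {r : Int} (hr : pvIsAns (pvM b ms) n.toNat r) :
    PySem.List.pyGetD (pvPoss (pvM b ms) T 0)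
      (PySem.Int.mod n ((pvCb (pvM b ms) T : Nat) : Int) - 1) 0 = r := by
  have hM := pvM_pos (b := b) hpos
  have hML := pvM_len hb hlen
  have hn' : 1 ≤ n.toNat := by omega
  have hj1 : 1 ≤ pvCb (pvM b ms) T := by
    obtain ⟨u, hu⟩ : ∃ u, T = u + 1 := ⟨T - 1, by omega⟩
    have h1 : pvCb (pvM b ms) T = pvCnt (pvM b ms) u := by rw [hu]; rfl
    have h2 := pvCnt_mono (pvM b ms) (Nat.zero_le u)
    rw [pvCnt_zero] at h2
    omega
  have hposs : pvPoss (pvM b ms) T 0 = (pvFlat (pvM b ms) T).map (fun i : Nat => (i : Int) + 1) := by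
    unfold pvPoss
    simp
  have hflen := pvFlat_len hM (M := pvM b ms) T
  have hne : (pvFlat (pvM b ms) T).map (fun i : Nat => (i : Int) + 1) ≠ [] := by
    intro hcon
    have := congrArg List.length hcon
    simp [hflen] at this
    omega
  rw [hposs, show n = ((n.toNat : Nat) : Int) from by omega, PySem.Int.mod_natCast]
  have hdm := Nat.div_add_mod n.toNat (pvCb (pvM b ms) T)
  have hmodlt : n.toNat % pvCb (pvM b ms) T < pvCb (pvM b ms) T := Nat.mod_lt _ (by omega)
  rcases Nat.eq_zero_or_pos (n.toNat % pvCb (pvM b ms) T) with h0 | hpos0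
  · rw [h0, show (((0:Nat)) : Int) - 1 = (-1 : Int) from by simp]
    rw [PySem.List.pyGetD_neg_one _ _ hne, List.getLast_eq_getElem hne]
    have hlt : (pvFlat (pvM b ms) T).length - 1 < (pvFlat (pvM b ms) T).length := by
      rw [hflen]; omega
    rw [List.getElem_map]
    have hlen2 : ((pvFlat (pvM b ms) T).map (fun i : Nat => (i : Int) + 1)).length - 1 =
        (pvFlat (pvM b ms) T).length - 1 := by simp
    have hans := pvFlat_ans hM T (pvCb (pvM b ms) T - 1) (by omega)
    rw [List.getD_eq_getElem _ _ (by rw [hflen]; omega)] at hans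
    have heq1 : pvCb (pvM b ms) T - 1 + 1 = pvCb (pvM b ms) T := by omega
    rw [heq1] at hans
    have hdiv1 : 1 ≤ n.toNat / pvCb (pvM b ms) T :=
      (Nat.le_div_iff_mul_le (by omega)).mpr (by omega)
    have hshift := pvIsAns_shift_mul hM hT hdvd (n.toNat / pvCb (pvM b ms) T - 1) hans
    have heq2 : pvCb (pvM b ms) T + pvCb (pvM b ms) T * (n.toNat / pvCb (pvM b ms) T - 1) = n.toNat := by
      have hx : pvCb (pvM b ms) T * (n.toNat / pvCb (pvM b ms) T - 1) + pvCb (pvM b ms) T =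
          pvCb (pvM b ms) T * (n.toNat / pvCb (pvM b ms) T) := by
        rw [← Nat.mul_succ]
        congr 1
        omega
      have hy : pvCb (pvM b ms) T * (n.toNat / pvCb (pvM b ms) T) = n.toNat := by omega
      omega
    rw [heq2] at hshift
    have := pvAns_unique hM hshift hr
    convert this using 3
    rw [hML] at *
    congr 1
    rw [hlen2, hflen]
  · obtain ⟨s, hs⟩ : ∃ s, n.toNat % pvCb (pvM b ms) T = s + 1 := ⟨n.toNat % pvCb (pvM b ms) T - 1, by omega⟩
    rw [hs, show (((s+1:Nat)) : Int) - 1 = ((s : Nat) : Int) from by push_cast; ring]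
    rw [PySem.List.pyGetD_natCast]
    have hslt : s < (pvFlat (pvM b ms) T).length := by rw [hflen]; omega
    rw [List.getD_eq_getElem _ _ (by simpa using hslt), List.getElem_map]
    have hans := pvFlat_ans hM T s (by omega)
    rw [List.getD_eq_getElem _ _ hslt] at hans
    have hshift := pvIsAns_shift_mul hM hT hdvd (n.toNat / pvCb (pvM b ms) T) hans
    have heq2 : s + 1 + pvCb (pvM b ms) T * (n.toNat / pvCb (pvM b ms) T) = n.toNat := by omega
    rw [heq2] at hshift
    exact pvAns_unique hM hshift hr

theorem pvLoopA_main {b n : Int} {ms : List Int} (hb : 1 ≤ b) (hlen : b ≤ (ms.length : Int))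
    (hpos : ∀ x ∈ ms.take b.toNat, 1 ≤ x) (hn : 1 ≤ n) {r : Int}
    (hr : pvIsAns (pvM b ms) n.toNat r) :
    ∀ (fuel T q : Nat), q ≤ (pvFree (pvM b ms) T).length →
      (T < (pvM b ms).prod ∨ q = 0) → T ≤ (pvM b ms).prod →
      ((pvM b ms).prod - T) * (b.toNat + 2) + (b.toNat + 1 - q) ≤ fuel →
      pvCb (pvM b ms) T + q + 1 ≤ n.toNat →
      pvLoopA n ms b fuel (pvIdle (pvM b ms) T q)
        ((pvCb (pvM b ms) T + q + 1 : Nat) : Int) (pvPoss (pvM b ms) T q) = r := by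
  have hM := pvM_pos (b := b) hpos
  have hML := pvM_len hb hlen
  have hlen1 : 1 ≤ (pvM b ms).length := by omega
  have hPpos : 1 ≤ (pvM b ms).prod := by
    rcases Nat.eq_zero_or_pos (pvM b ms).prod with h | h
    · exfalso
      have := List.prod_eq_zero_iff.mp h
      have := hM 0 this
      omega
    · omega
  have hdvdP : ∀ i < (pvM b ms).length, (pvM b ms).prod % pvDur (pvM b ms) i = 0 := by
    intro i hi
    apply Nat.dvd_iff_mod_eq_zero.mp
    have : pvDur (pvM b ms) i = (pvM b ms)[i] := List.getD_eq_getElem _ 1 hi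
    rw [this]
    exact List.dvd_prod (List.getElem_mem hi)
  intro fuel
  induction fuel using Nat.strong_induction_on with
  | _ fuel ih =>
  intro T q hq hTq hT hfuel hnxt
  have hfreelen : (pvFree (pvM b ms) T).length ≤ b.toNat := by
    have h1 : (pvFree (pvM b ms) T).length ≤ (List.range (pvM b ms).length).length :=
      List.length_filter_le _ _
    rw [List.length_range, hML] at h1
    exact h1
  obtain ⟨fuel, rfl⟩ : ∃ f, fuel = f + 1 := ⟨fuel - 1, by omega⟩
  simp only [pvLoopA]
  -- the serve step, used from two branches
  have hserve : q < (pvFree (pvM b ms) T).length → T < (pvM b ms).prod →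
      (if ((pvCb (pvM b ms) T + q + 1 : Nat) : Int) = n
       then ((pvIdle (pvM b ms) T q).idxOf 0 : Int) + 1
       else pvLoopA n ms b fuel
         ((pvIdle (pvM b ms) T q).set ((pvIdle (pvM b ms) T q).idxOf 0)
           (PySem.List.pyGetD ms (((pvIdle (pvM b ms) T q).idxOf 0 : Nat) : Int) 0))
         (((pvCb (pvM b ms) T + q + 1 : Nat) : Int) + 1)
         (pvPoss (pvM b ms) T q ++ [((pvIdle (pvM b ms) T q).idxOf 0 : Int) + 1])) = r := by
    intro hqlt hTP
    rw [pvIdxOf_idle hM hqlt]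
    have hfq_lt : (pvFree (pvM b ms) T).getD q 0 < b.toNat := by
      have h1 := List.getElem_mem hqlt
      rw [← List.getD_eq_getElem _ 0 hqlt] at h1
      have := (pvMem_free.mp h1).1
      omega
    have hfq_mem : (pvFree (pvM b ms) T).getD q 0 ∈ pvFree (pvM b ms) T := by
      rw [List.getD_eq_getElem _ 0 hqlt]
      exact List.getElem_mem hqlt
    have hcnteq := pvCnt_eq hM (M := pvM b ms) T
    by_cases hnn : ((pvCb (pvM b ms) T + q + 1 : Nat) : Int) = n
    · rw [if_pos hnn]
      have hne : pvCb (pvM b ms) T + q + 1 = n.toNat := by omega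
      have hansme : pvIsAns (pvM b ms) n.toNat
          ((((pvFree (pvM b ms) T).getD q 0 : Nat) : Int) + 1) := by
        refine ⟨T, by omega, by omega, ?_⟩
        rw [show n.toNat - pvCb (pvM b ms) T - 1 = q from by omega]
      exact pvAns_unique hM hansme hr
    · rw [if_neg hnn]
      rw [pvMs_get hpos hfq_lt hlen, pvSet_idle hM hqlt, ← pvPoss_succ hqlt]
      rw [show (((pvCb (pvM b ms) T + q + 1 : Nat)) : Int) + 1 =
        ((pvCb (pvM b ms) T + (q + 1) + 1 : Nat) : Int) from by push_cast; ring]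
      apply ih fuel (by omega) T (q+1) (by omega) (Or.inl hTP) hT
      · have h1 : (pvM b ms).prod - T ≥ 1 := by omega
        omega
      · have : pvCb (pvM b ms) T + q + 1 ≠ n.toNat := by
          intro hcon
          exact hnn (by omega)
        omega
  by_cases hz : pvIdle (pvM b ms) T q = pvZerosA b
  · have hz' : pvIdle (pvM b ms) T q = List.replicate (pvM b ms).length 0 := by
      rw [hz, pvZerosA_eq, hML]
    obtain ⟨hq0, hdvdT⟩ := (pvIdle_eq_zeros_iff hM hlen1 hq).mp hz'
    subst hq0
    rcases Nat.eq_zero_or_pos T with rfl | hT1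
    · -- start of the simulation: nxt = 1
      rw [if_pos (Or.inl (by norm_num [pvCb]))]
      rw [if_pos ((pvZero_mem_iff hM hq).mpr (by rw [pvFree_zero, List.length_range]; omega))]
      exact hserve (by rw [pvFree_zero, List.length_range]; omega) (by omega)
    · -- all barbers simultaneously free again: the loop exits, fallback path
      have hj1 : 1 ≤ pvCb (pvM b ms) T := by
        obtain ⟨u, hu⟩ : ∃ u, T = u + 1 := ⟨T - 1, by omega⟩
        have h1 : pvCb (pvM b ms) T = pvCnt (pvM b ms) u := by rw [hu]; rfl
        have h2 := pvCnt_mono (pvM b ms) (Nat.zero_le u)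
        rw [pvCnt_zero] at h2
        omega
      rw [if_neg (not_or.mpr ⟨by
        intro hcon
        have : pvCb (pvM b ms) T + 0 + 1 = 1 := by exact_mod_cast hcon
        omega, fun hcon => hcon hz⟩)]
      rw [show (((pvCb (pvM b ms) T + 0 + 1 : Nat)) : Int) - 1 =
        ((pvCb (pvM b ms) T : Nat) : Int) from by push_cast; ring]
      exact pvFallback hb hlen hpos hn hT1 hdvdT (by omega) hr
  · have hTP : T < (pvM b ms).prod := by
      rcases hTq with h | hq0
      · exact h
      · rcases Nat.lt_or_ge T (pvM b ms).prod with h | h2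
        · exact h
        · exfalso
          have hTeq : T = (pvM b ms).prod := by omega
          apply hz
          rw [pvZerosA_eq, ← hML]
          exact (pvIdle_eq_zeros_iff hM hlen1 hq).mpr ⟨hq0, by rw [hTeq]; exact hdvdP⟩
    rw [if_pos (Or.inr hz)]
    by_cases hqlt : q < (pvFree (pvM b ms) T).length
    · rw [if_pos ((pvZero_mem_iff hM hq).mpr hqlt)]
      exact hserve hqlt hTP
    · rw [if_neg (by
        intro hcon
        exact hqlt ((pvZero_mem_iff hM hq).mp hcon))]
      have hqe : q = (pvFree (pvM b ms) T).length := by omega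
      subst hqe
      rw [pvMin_idle hM hlen1, pvAdvance_idle hM hlen1, ← pvPoss_advance hM hlen1]
      have hd1 := pvDelta_pos hM (M := pvM b ms) T
      have hcbadv : pvCb (pvM b ms) (T + pvDelta (pvM b ms) T) = pvCnt (pvM b ms) T :=
        pvCb_advance hM hlen1 hd1 (le_refl _)
      have hcnteq := pvCnt_eq hM (M := pvM b ms) T
      rw [show (((pvCb (pvM b ms) T + (pvFree (pvM b ms) T).length + 1 : Nat)) : Int) =
        ((pvCb (pvM b ms) (T + pvDelta (pvM b ms) T) + 0 + 1 : Nat) : Int) from by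
          rw [hcbadv]; congr 1; omega]
      have hTadv := pvT_advance_le hM hlen1 hTP
      apply ih fuel (by omega) (T + pvDelta (pvM b ms) T) 0 (by omega) (Or.inr rfl) hTadv
      · have hx : (pvM b ms).prod - (T + pvDelta (pvM b ms) T) + 1 ≤ (pvM b ms).prod - T := by
          omega
        have hy : ((pvM b ms).prod - (T + pvDelta (pvM b ms) T) + 1) * (b.toNat + 2) ≤
            ((pvM b ms).prod - T) * (b.toNat + 2) := Nat.mul_le_mul_right _ hx
        rw [Nat.add_mul, Nat.one_mul] at hy
        omega
      · rw [hcbadv]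
        omega


-- the first-instant burst: with all barbers free at time 0, customer n ≤ b is served by
-- barber n before any duration beyond the first n-1 is read
theorem pvBurst {b n : Int} {ms : List Int} (hb : 1 ≤ b) (hn : 1 ≤ n) (hnb : n ≤ b)
    (hlen2 : n - 1 ≤ (ms.length : Int)) (hnz : ∀ x ∈ ms.take (n-1).toNat, x ≠ 0) :
    ∀ (fuel k : Nat), k < n.toNat → n.toNat - k ≤ fuel →
      pvLoopA n ms b fuel (ms.take k ++ List.replicate (b.toNat - k) 0) ((k : Int) + 1)
        ((List.range k).map (fun i : Nat => (i : Int) + 1)) = n := by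
  intro fuel
  induction fuel with
  | zero => intro k hk hf; omega
  | succ fuel ih =>
      intro k hk hf
      have hkl : k ≤ (n-1).toNat := by omega
      have hlenN : (n-1).toNat ≤ ms.length := by omega
      have hkb : k < b.toNat := by omega
      have htkl : (ms.take k).length = k := by rw [List.length_take]; omega
      have hmem_tk : ∀ m, (hm : m < k) → ms[m]'(by omega) ∈ ms.take (n-1).toNat := by
        intro m hm
        exact List.mem_take_iff_getElem.mpr ⟨m, by omega, rfl⟩
      simp only [pvLoopA]
      have hidx : (ms.take k ++ List.replicate (b.toNat - k) 0).idxOf 0 = k := by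
        apply pvIdxOf_spec _ _ _ (by simp [htkl]; omega)
        · rw [List.getElem?_append_right (by omega), htkl, Nat.sub_self]
          rw [List.getElem?_replicate, if_pos (by omega)]
        · intro m hm
          rw [List.getElem?_append_left (by omega), List.getElem?_take, if_pos (by omega),
            List.getElem?_eq_getElem (by omega)]
          intro hcon
          exact hnz _ (hmem_tk m hm) (Option.some_injective _ hcon)
      have hcond : ((k : Int) + 1 = 1 ∨ (ms.take k ++ List.replicate (b.toNat - k) 0) ≠ pvZerosA b) := by
        cases k with
        | zero => left; norm_num
        | succ s =>
            right
            intro hcon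
            rw [pvZerosA_eq] at hcon
            have h0 := congrArg (fun l => l[0]?) hcon
            simp only at h0
            rw [List.getElem?_append_left (by omega), List.getElem?_take, if_pos (by omega),
              List.getElem?_eq_getElem (by omega), List.getElem?_replicate,
              if_pos (by omega)] at h0
            exact hnz _ (hmem_tk 0 (by omega)) (Option.some_injective _ h0)
      rw [if_pos hcond]
      have hzmem : (0 : Int) ∈ ms.take k ++ List.replicate (b.toNat - k) 0 :=
        List.mem_append_right _ (List.mem_replicate.mpr ⟨by omega, rfl⟩)
      rw [if_pos hzmem, hidx]
      by_cases hke : (k : Int) + 1 = n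
      · rw [if_pos hke]
        exact hke
      · rw [if_neg hke]
        have hkn : k + 1 < n.toNat := by omega
        have hmsk : PySem.List.pyGetD ms (k : Int) 0 = ms[k]'(by omega) := by
          rw [PySem.List.pyGetD_natCast, List.getD_eq_getElem _ _ (by omega)]
        rw [hmsk]
        have hset : (ms.take k ++ List.replicate (b.toNat - k) 0).set k (ms[k]'(by omega)) =
            ms.take (k+1) ++ List.replicate (b.toNat - (k+1)) 0 := by
          rw [List.set_append, if_neg (by omega), htkl, Nat.sub_self]
          rw [show b.toNat - k = (b.toNat - (k+1)) + 1 from by omega, List.replicate_succ]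
          rw [List.set_cons_zero]
          rw [List.take_add_one, List.getElem?_eq_getElem (by omega), Option.toList_some,
            List.append_assoc]
          rfl
        rw [hset]
        rw [show ((k : Int) + 1) + 1 = ((k+1 : Nat) : Int) + 1 from by push_cast; ring]
        rw [show (List.range k).map (fun i : Nat => (i : Int) + 1) ++ [(k : Int) + 1] =
          (List.range (k+1)).map (fun i : Nat => (i : Int) + 1) from by
            rw [List.range_succ, List.map_append]
            rfl]
        exact ih (k+1) hkn (by omega)

-- ===== VERDICT (by name: the statement is the Claim_ definition above) =====
theorem process_spec : Claim_equal_process := by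
  intro b n ms _hdom hpre
  obtain ⟨hb, hn, harm⟩ := hpre
  show process b n ms = process_alt b n ms
  by_cases hnb : n ≤ b
  · -- customer n walks straight to barber n at time 0
    have harm1 : n - 1 ≤ (ms.length : Int) ∧ ∀ x ∈ ms.take (n-1).toNat, x ≠ 0 := by
      rcases harm with ⟨-, h2, h3⟩ | ⟨h2, h3⟩
      · exact ⟨h2, h3⟩
      · refine ⟨by omega, ?_⟩
        intro x hx
        have hsub : ms.take (n-1).toNat = (ms.take b.toNat).take (n-1).toNat := by
          rw [List.take_take, min_eq_left (by omega)]
        rw [hsub] at hx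
        have := h3 x (List.mem_of_mem_take hx)
        omega
    have hB : process_alt b n ms = n := by
      unfold process_alt
      rw [if_pos ⟨hn, hnb⟩]
    rw [hB]
    unfold process
    have hfuel : n.toNat - 0 ≤ pvFuelA b ms := by
      unfold pvFuelA
      have h1 : 1 * (b.toNat + 2) ≤
          ((ms.take b.toNat).foldl (fun a x => a * x.natAbs) 1 + 1) * (b.toNat + 2) :=
        Nat.mul_le_mul_right _ (by omega)
      omega
    have := pvBurst hb hn hnb harm1.1 harm1.2 (pvFuelA b ms) 0 (by omega) hfuel
    rw [show (ms.take 0 ++ List.replicate (b.toNat - 0) 0) = pvZerosA b from by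
      simp [pvZerosA_eq]] at this
    rw [show (((0:Nat) : Int) + 1) = (1 : Int) from by norm_num] at this
    rw [show (List.range 0).map (fun i : Nat => (i : Int) + 1) = ([] : List Int) from rfl] at this
    exact this
  · -- binary search on the start time
    have harm2 : b ≤ (ms.length : Int) ∧ ∀ x ∈ ms.take b.toNat, 1 ≤ x := by
      rcases harm with ⟨h1, -, -⟩ | h
      · omega
      · exact h
    obtain ⟨hlen, hpos⟩ := harm2
    have hr := pvAlt_isAns hb hlen hn hpos hnb
    have hM := pvM_pos (b := b) hpos
    have hML := pvM_len hb hlen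
    have hlen1 : 1 ≤ (pvM b ms).length := by omega
    unfold process
    have hidle0 : pvZerosA b = pvIdle (pvM b ms) 0 0 := by
      rw [pvZerosA_eq, ← hML]
      symm
      exact (pvIdle_eq_zeros_iff hM hlen1 (Nat.zero_le _)).mpr ⟨rfl, by intro i hi; simp⟩
    have hposs0 : ([] : List Int) = pvPoss (pvM b ms) 0 0 := by
      unfold pvPoss pvFlat
      simp
    have hnxt0 : (1 : Int) = ((pvCb (pvM b ms) 0 + 0 + 1 : Nat) : Int) := by simp [pvCb]
    rw [hidle0, hposs0, hnxt0]
    apply pvLoopA_main hb hlen hpos hn hr (pvFuelA b ms) 0 0 (Nat.zero_le _) (Or.inr rfl)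
      (Nat.zero_le _) ?_ (by simp [pvCb]; omega)
    have hfold : (ms.take b.toNat).foldl (fun a x => a * x.natAbs) 1 = (pvM b ms).prod := by
      have h1 : (pvM b ms).prod = (pvM b ms).foldl (· * ·) 1 := List.prod_eq_foldl
      rw [h1]
      unfold pvM
      rw [List.foldl_map]
      have h2 : ∀ (l : List Int), (∀ x ∈ l, 1 ≤ x) → ∀ (a : Nat),
          l.foldl (fun a x => a * x.natAbs) a = l.foldl (fun a x => a * x.toNat) a := by
        intro l
        induction l with
        | nil => intro _ a; rfl
        | cons y ys ihl =>
            intro hpos2 a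
            have hy : y.natAbs = y.toNat := by
              have := hpos2 y List.mem_cons_self
              omega
            simp only [List.foldl_cons, hy]
            exact ihl (fun x hx => hpos2 x (List.mem_cons_of_mem _ hx)) _
      exact h2 _ (fun x hx => hpos x hx) 1
    unfold pvFuelA
    rw [hfold, Nat.add_mul, Nat.one_mul]
    simp only [Nat.sub_zero]
    omega
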